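-- pv_equiv track=rewrite | github.com/kylejow/Mediasite-Bot | verify_spreadsheet.py | is_valid_days
-- ===== SOURCE A (Python) =====
-- def is_valid_days(days):
--     valid_sequence = "MTWRF"
--     index = 0
--
--     for day in days:
--         if day not in valid_sequence:
--             return False
--         while index < len(valid_sequence) and valid_sequence[index] != day:
--             index += 1
--         if index == len(valid_sequence):
--             return False
--
--     return True
-- ===== SOURCE B (Python) =====
-- def is_valid_days(days):
--     seq = "MTWRF"
--     if any(d not in seq for d in days):
--         return False
--     positions = [seq.find(d) for d in days]
--     return positions == sorted(positions)
-- ===== Notes on version B (the rewrite author's own statement) =====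
-- stated objective: alternative
-- what changed: Replaces A's single-pass pointer-advancing scan with a staged pipeline: guard that every character occurs in 'MTWRF', map each day to its position with str.find, and accept iff the position list equals its sorted copy.
import Mathlib
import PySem

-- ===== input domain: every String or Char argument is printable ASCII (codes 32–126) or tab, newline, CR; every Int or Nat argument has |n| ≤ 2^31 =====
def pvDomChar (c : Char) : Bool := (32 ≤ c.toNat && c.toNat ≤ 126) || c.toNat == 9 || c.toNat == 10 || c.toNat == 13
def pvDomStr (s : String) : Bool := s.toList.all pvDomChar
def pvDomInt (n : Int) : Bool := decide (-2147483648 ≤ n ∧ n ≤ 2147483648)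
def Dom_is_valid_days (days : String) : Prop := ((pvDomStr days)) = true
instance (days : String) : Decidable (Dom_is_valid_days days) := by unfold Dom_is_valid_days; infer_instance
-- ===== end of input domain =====

-- B restates the check as a staged pipeline: guard membership, map each day to its
-- position in "MTWRF" with str.find, accept iff the position list equals its sorted
-- copy (objective: alternative; not claimed faster).

-- ===== PORT A =====
-- while index < len(valid_sequence) and valid_sequence[index] != day: index += 1
-- (fuel 5 - i only makes the while loop total; the computation is the same)
def pvAdvanceAux (d : Char) : Nat → Nat → Nat
  | 0, i => i
  | fuel + 1, i =>
    if i < 5 ∧ "MTWRF".toList.getD i ' ' ≠ d then pvAdvanceAux d fuel (i + 1) else i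

def pvAdvanceA (d : Char) (i : Nat) : Nat := pvAdvanceAux d (5 - i) i

def pvLoopA : List Char → Nat → Bool
  | [], _ => true
  | d :: rest, index =>
    if d ∈ "MTWRF".toList then
      let index' := pvAdvanceA d index
      if index' = 5 then false else pvLoopA rest index'
    else false

def is_valid_days (days : String) : Bool := pvLoopA days.toList 0

-- ===== PORT B =====
-- if any(d not in seq for d in days): return False
-- positions = [seq.find(d) for d in days]; return positions == sorted(positions)
def is_valid_days_alt (days : String) : Bool :=
  if days.toList.any (fun d => !(PySem.Chars.isIn [d] "MTWRF".toList)) then false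
  else
    let positions := days.toList.map (fun d => PySem.Chars.find "MTWRF".toList [d])
    positions == PySem.List.sorted positions (fun x => x) false

-- ===== PRECONDITION & SPEC =====
def Spec_is_valid_days (days : String) (out : Bool) : Prop := out = is_valid_days_alt days
instance (days : String) (out : Bool) : Decidable (Spec_is_valid_days days out) := by unfold Spec_is_valid_days; infer_instance

-- ===== CLAIM (what is proved, stated in full; the proofs are below) =====
def Claim_equal_is_valid_days : Prop := ∀ (days : String), Dom_is_valid_days days → Spec_is_valid_days days (is_valid_days days)

-- ===== LEMMAS AND PROOFS =====

-- proof helpers: the position str.find assigns to a character, and a Bool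
-- "non-decreasing chain from prev" predicate both sides are reduced to
def pvPos (d : Char) : Int := PySem.Chars.find "MTWRF".toList [d]

def pvChainB (prev : Int) : List Int → Bool
  | [] => true
  | x :: t => decide (prev ≤ x) && pvChainB x t

theorem pvIsIn_singleton (d : Char) :
    PySem.Chars.isIn [d] "MTWRF".toList = true ↔ d ∈ "MTWRF".toList := by
  rw [PySem.Chars.isIn_iff_infix]
  constructor
  · intro h; exact h.subset (by simp)
  · intro h
    obtain ⟨s, t, h⟩ := List.append_of_mem h
    exact ⟨s, t, by rw [h]; simp⟩

-- per-step fact table: for a valid day d and a reachable pointer i, A's while loop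
-- lands exactly at pvPos d (or runs off the end when pvPos d < i)
theorem pvStep (d : Char) (hd : d ∈ "MTWRF".toList) (i : Nat) (hi : i ≤ 4) :
    (pvAdvanceA d i = if pvPos d < (i : Int) then 5 else (pvPos d).toNat) ∧
      0 ≤ pvPos d ∧ pvPos d ≤ 4 := by
  have hd' : d = 'M' ∨ d = 'T' ∨ d = 'W' ∨ d = 'R' ∨ d = 'F' := by simpa using hd
  interval_cases i <;> rcases hd' with rfl | rfl | rfl | rfl | rfl <;> exact ⟨by decide, by decide, by decide⟩

-- invariant: A's loop from pointer i accepts iff every day is valid and the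
-- position list is non-decreasing starting from i
theorem pvLoopA_eq (l : List Char) : ∀ i : Nat, i ≤ 4 →
    pvLoopA l i =
      (l.all (fun d => decide (d ∈ "MTWRF".toList)) && pvChainB (i : Int) (l.map pvPos)) := by
  induction l with
  | nil => intro i _; simp [pvLoopA, pvChainB]
  | cons d rest ih =>
    intro i hi
    by_cases hmem : d ∈ "MTWRF".toList
    · obtain ⟨hadv, hpos0, hpos4⟩ := pvStep d hmem i hi
      rw [show pvLoopA (d :: rest) i =
          (if pvAdvanceA d i = 5 then false else pvLoopA rest (pvAdvanceA d i)) from by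
        simp only [pvLoopA, if_pos hmem]]
      rw [hadv]
      simp only [List.all_cons, List.map_cons, pvChainB, decide_eq_true hmem, Bool.true_and]
      by_cases hlt : pvPos d < (i : Int)
      · rw [if_pos hlt, decide_eq_false (show ¬ ((i : Int) ≤ pvPos d) by omega)]
        simp
      · have hle : (i : Int) ≤ pvPos d := by omega
        have hne : (pvPos d).toNat ≠ 5 := by omega
        have hle4 : (pvPos d).toNat ≤ 4 := by omega
        have hcast : (((pvPos d).toNat : Nat) : Int) = pvPos d := by omega
        rw [if_neg hlt, if_neg hne, ih (pvPos d).toNat hle4, hcast, decide_eq_true hle,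
          Bool.true_and]
    · simp only [pvLoopA, if_neg hmem, List.all_cons, decide_eq_false hmem, Bool.false_and]

theorem pvChainB_iff : ∀ (xs : List Int) (a : Int),
    pvChainB a xs = true ↔ ((∀ x ∈ xs, a ≤ x) ∧ xs.Pairwise (· ≤ ·))
  | [], a => by simp [pvChainB]
  | x :: t, a => by
    simp only [pvChainB, Bool.and_eq_true, decide_eq_true_eq, pvChainB_iff t x,
      List.pairwise_cons, List.mem_cons]
    constructor
    · rintro ⟨hax, hxt, hp⟩
      refine ⟨fun y hy => ?_, hxt, hp⟩
      rcases hy with rfl | hy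
      · exact hax
      · exact le_trans hax (hxt y hy)
    · rintro ⟨hall, hxt, hp⟩
      exact ⟨hall x (Or.inl rfl), ⟨hxt, hp⟩⟩

-- a list of nonnegative ints equals its sorted copy iff it is non-decreasing
theorem pvSorted_iff (xs : List Int) (hnn : ∀ x ∈ xs, 0 ≤ x) :
    (xs == PySem.List.sorted xs (fun x => x) false) = pvChainB 0 xs := by
  have h1 : xs = PySem.List.sorted xs (fun x => x) false ↔ xs.Pairwise (· ≤ ·) := by
    constructor
    · intro h
      have hp := PySem.List.sorted_pairwise xs (fun x => x)
      rw [← h] at hp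
      simpa using hp
    · intro h
      exact (PySem.List.sorted_eq_self_of_pairwise xs (fun x => x) (by simpa using h)).symm
  rw [Bool.eq_iff_iff, beq_iff_eq, h1, pvChainB_iff]
  exact ⟨fun h => ⟨hnn, h⟩, fun h => h.2⟩

-- ===== VERDICT (by name: the statement is the Claim_ definition above) =====
theorem is_valid_days_spec : Claim_equal_is_valid_days := by
  intro days _
  unfold Spec_is_valid_days is_valid_days is_valid_days_alt
  rw [pvLoopA_eq days.toList 0 (by omega)]
  by_cases hbad : days.toList.any (fun d => !(PySem.Chars.isIn [d] "MTWRF".toList)) = true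
  · obtain ⟨d, hd, hnotin⟩ := List.any_eq_true.mp hbad
    have hno : d ∉ "MTWRF".toList := by
      intro hmem
      rw [(pvIsIn_singleton d).mpr hmem] at hnotin
      cases hnotin
    rw [if_pos hbad,
      show (days.toList.all (fun d => decide (d ∈ "MTWRF".toList))) = false from
        List.all_eq_false.mpr ⟨d, hd, by simpa using hno⟩]
    simp
  · have hbad' : days.toList.any (fun d => !(PySem.Chars.isIn [d] "MTWRF".toList)) = false := by
      simpa using hbad
    have hall : ∀ d ∈ days.toList, d ∈ "MTWRF".toList := by
      intro d hd
      have h := List.any_eq_false.mp hbad' d hd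
      exact (pvIsIn_singleton d).mp (by simpa using h)
    have hnn : ∀ x ∈ days.toList.map pvPos, 0 ≤ x := by
      intro x hx
      obtain ⟨d, hd, rfl⟩ := List.mem_map.mp hx
      exact (pvStep d (hall d hd) 0 (by omega)).2.1
    rw [if_neg hbad,
      show (days.toList.all (fun d => decide (d ∈ "MTWRF".toList))) = true from
        List.all_eq_true.mpr (fun d hd => by simpa using hall d hd),
      Bool.true_and]
    simp only [Nat.cast_zero]
    rw [← pvSorted_iff (days.toList.map pvPos) hnn]
    rfl
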